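-- pv_equiv track=rewrite | github.com/g1tsys/coding | Day 3 - Score 100/395_longest_legal.py | find_longest_valid_expression
-- ===== SOURCE A (Python) =====
-- def evaluate(expression):
--     # 如果表达式为空，则直接返回0
--     if not expression:
--         return 0
--     # 初始化栈、当前数字和当前符号
--     stack, num, sign = [], 0, "+"
--     # 定义操作符集合
--     operators = set("+-*")
--     # 在表达式末尾添加一个"+"，以方便处理最后一个数字
--     expression += "+"
--     for char in expression:
--         if char.isdigit():
--             # 累积数字
--             num = num * 10 + int(char)
--         elif char in operators:
--             # 根据前一个符号进行计算，并将结果放入栈中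
--             if sign == "+":
--                 stack.append(num)
--             elif sign == "-":
--                 stack.append(-num)
--             elif sign == "*":
--                 # 乘法直接作用于栈顶元素
--                 if stack:
--                     stack[-1] = stack[-1] * num
--                 else:
--                     # 如果表达式以"*"开始，视作乘以1
--                     stack.append(num)
--             # 重置当前数字，并更新当前符号
--             num, sign = 0, char
--     # 将栈中所有数字相加得到结果
--     return sum(stack)
--
-- def find_longest_valid_expression(s):
--     max_length = 0
--     max_expr = ""
--     # 定义合法字符集合
--     valid_chars = set("1234567890+-*")
--
--     start = 0
--     while start < len(s):
--         end = start
--         # 找到一个可能的表达式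
--         while end < len(s) and s[end] in valid_chars:
--             end += 1
--         # 回退并找到最长的合法表达式
--         while end > start:
--             if s[start:end].lstrip("-").replace("-", "+").replace("*", "+").count("+") > 0:
--                 length = end - start
--                 if length > max_length:
--                     max_length = length
--                     max_expr = s[start:end]
--                 break
--             end -= 1
--         start += 1
--
--     # 如果找到了合法的表达式，则计算其结果，否则返回0
--     if max_expr:
--         return evaluate(max_expr)
--     else:
--         return 0
-- ===== SOURCE B (Python) =====
-- def find_longest_valid_expression(s):
--     # Single left-to-right scan over maximal runs of valid chars (O(n)):
--     # a run qualifies iff it contains an operator after its leading '-' prefix,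
--     # and then the whole run is the candidate; keep the leftmost longest.
--     valid = "0123456789+-*"
--     ops = "+-*"
--     best = ""
--     i, n = 0, len(s)
--     while i < n:
--         if s[i] not in valid:
--             i += 1
--             continue
--         j = i
--         while j < n and s[j] in valid:
--             j += 1
--         run = s[i:j]
--         k = 0
--         while k < len(run) and run[k] == '-':
--             k += 1
--         if any(c in ops for c in run[k:]) and len(run) > len(best):
--             best = run
--         i = j
--     if not best:
--         return 0
--     # evaluate: tokenize into numbers and operators, then one fold with
--     # (total of finished terms, current term) -- no stack.
--     nums, opers = [], []
--     num = 0
--     for c in best: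
--         if c in ops:
--             nums.append(num)
--             opers.append(c)
--             num = 0
--         else:
--             num = num * 10 + int(c)
--     nums.append(num)
--     total, cur = 0, nums[0]
--     for op, v in zip(opers, nums[1:]):
--         if op == '*':
--             cur *= v
--         elif op == '+':
--             total += cur
--             cur = v
--         else:
--             total += cur
--             cur = -v
--     return total + cur
-- ===== Notes on version B (the rewrite author's own statement) =====
-- stated objective: faster
-- what changed: B replaces A's per-start rescan-and-backtrack over the string (each position re-scans its run and re-checks shrinking slices) by a single left-to-right pass over maximal runs of valid characters, keeping the leftmost longest qualifying run, and evaluates it with a tokenizer plus a two-accumulator (total, current-term) fold instead of A's stack.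
import Mathlib
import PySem

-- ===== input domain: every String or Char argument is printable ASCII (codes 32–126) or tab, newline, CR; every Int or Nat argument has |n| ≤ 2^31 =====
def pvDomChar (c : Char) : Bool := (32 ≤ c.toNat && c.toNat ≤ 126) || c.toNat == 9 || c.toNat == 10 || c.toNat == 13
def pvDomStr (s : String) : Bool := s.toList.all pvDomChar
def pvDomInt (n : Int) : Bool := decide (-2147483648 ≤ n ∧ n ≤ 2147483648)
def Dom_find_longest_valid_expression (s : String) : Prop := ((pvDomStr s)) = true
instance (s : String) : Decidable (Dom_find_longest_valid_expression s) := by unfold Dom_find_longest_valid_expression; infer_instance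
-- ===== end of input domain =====

-- B re-implements A in a single O(n) scan over maximal runs of valid characters (A rescans
-- a run from every start position, O(n^2)), and evaluates with two integer accumulators
-- instead of a stack; same return value on every input.

-- ===== PORT A =====

-- int(char) for an ASCII digit char (A only applies it under char.isdigit())
def pvIntOfDigit (c : Char) : Int := ((c.toNat - 48 : Nat) : Int)

def opsSetA : List Char := ['+', '-', '*']            -- operators = set("+-*")
def validCharsA : List Char := ['1','2','3','4','5','6','7','8','9','0','+','-','*']

-- one step of A's evaluate loop, state = (stack, num, sign)
def evalStepA (st : List Int × Int × Char) (c : Char) : List Int × Int × Char :=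
  if PySem.Chars.isdigit c then (st.1, st.2.1 * 10 + pvIntOfDigit c, st.2.2)
  else if opsSetA.contains c then
    let stack :=
      if st.2.2 = '+' then st.1 ++ [st.2.1]
      else if st.2.2 = '-' then st.1 ++ [-st.2.1]
      else if st.2.2 = '*' then
        match st.1.getLast? with        -- if stack: stack[-1] = stack[-1] * num
        | some v => st.1.dropLast ++ [v * st.2.1]
        | none => [st.2.1]
      else st.1
    (stack, 0, c)
  else st

def evalA (expression : List Char) : Int :=
  if expression.isEmpty then 0
  else (((expression ++ ['+']).foldl evalStepA ([], 0, '+')).1).sum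

-- `while end < len(s) and s[end] in valid_chars: end += 1`
def scanEndA (s : List Char) (e : Nat) : Nat :=
  if h : e < s.length then
    if validCharsA.contains s[e] then scanEndA s (e + 1) else e
  else e
termination_by s.length - e

-- s[start:end].lstrip("-").replace("-","+").replace("*","+").count("+") > 0
-- (lstrip("-") ported by hand as dropWhile on the single strip char; exact)
def qualA (t : List Char) : Bool :=
  decide (0 < PySem.Chars.count
    (PySem.Chars.replace (PySem.Chars.replace (t.dropWhile (· = '-')) ['-'] ['+']) ['*'] ['+'])
    ['+'])

-- `while end > start: … end -= 1` (returns the updated (max_length, max_expr))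
def innerA (s : List Char) (start e maxLen : Nat) (maxExpr : List Char) : Nat × List Char :=
  if e > start then
    if qualA (PySem.List.slice s (some (start : Int)) (some (e : Int))) then
      if e - start > maxLen then (e - start, PySem.List.slice s (some (start : Int)) (some (e : Int)))
      else (maxLen, maxExpr)
    else innerA s start (e - 1) maxLen maxExpr
  else (maxLen, maxExpr)
termination_by e

-- `while start < len(s): … start += 1`
def outerA (s : List Char) (start maxLen : Nat) (maxExpr : List Char) : List Char :=
  if _h : start < s.length then
    let e := scanEndA s start
    let mx := innerA s start e maxLen maxExpr
    outerA s (start + 1) mx.1 mx.2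
  else maxExpr
termination_by s.length - start

def find_longest_valid_expression (s : String) : Int :=
  let maxExpr := outerA s.toList 0 0 []
  if maxExpr.isEmpty then 0 else evalA maxExpr

-- ===== PORT B =====

-- int(char) for an ASCII digit char (Source B applies it to digit chars only)
def pvIntOfDigitB (c : Char) : Int := ((c.toNat - 48 : Nat) : Int)

def validB : List Char := ['0','1','2','3','4','5','6','7','8','9','+','-','*']
def opsB : List Char := ['+', '-', '*']

-- `while j < n and s[j] in valid: j += 1`
def scanJB (s : List Char) (j : Nat) : Nat :=
  if h : j < s.length then
    if validB.contains s[j] then scanJB s (j + 1) else j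
  else j
termination_by s.length - j

theorem le_scanJB (s : List Char) (j : Nat) : j ≤ scanJB s j := by
  rw [scanJB]
  split
  · split
    · exact Nat.le_of_succ_le (le_scanJB s (j + 1))
    · exact Nat.le_refl j
  · exact Nat.le_refl j
termination_by s.length - j

theorem lt_scanJB (s : List Char) (j : Nat) (h : j < s.length)
    (hv : validB.contains s[j] = true) : j < scanJB s j := by
  rw [scanJB, dif_pos h, if_pos hv]
  exact Nat.lt_of_lt_of_le (Nat.lt_succ_self j) (le_scanJB s (j + 1))

-- `while k < len(run) and run[k] == '-': k += 1`
def kLoopB (run : List Char) (k : Nat) : Nat :=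
  if h : k < run.length then
    if run[k] = '-' then kLoopB run (k + 1) else k
  else k
termination_by run.length - k

-- the run/skip scan of Source B
def loopB (s : List Char) (i : Nat) (best : List Char) : List Char :=
  if h : i < s.length then
    if hv : validB.contains s[i] then
      let j := scanJB s i
      let run := PySem.List.slice s (some (i : Int)) (some (j : Int))
      let k := kLoopB run 0
      let best' :=
        if (PySem.List.slice run (some (k : Int)) none).any (fun c => opsB.contains c)
            && run.length > best.length then run
        else best
      loopB s j best'
    else loopB s (i + 1) best
  else best
termination_by s.length - i
decreasing_by
  · have := lt_scanJB s i h hv; omega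
  · omega

-- tokenizer step of Source B: state = (nums, opers, num)
def tokStepB (st : List Int × List Char × Int) (c : Char) : List Int × List Char × Int :=
  if opsB.contains c then (st.1 ++ [st.2.2], st.2.1 ++ [c], 0)
  else (st.1, st.2.1, st.2.2 * 10 + pvIntOfDigitB c)

-- the (total, cur) fold over zip(opers, nums[1:])
def zipStepB (tc : Int × Int) (ov : Char × Int) : Int × Int :=
  if ov.1 = '*' then (tc.1, tc.2 * ov.2)
  else if ov.1 = '+' then (tc.1 + tc.2, ov.2)
  else (tc.1 + tc.2, -ov.2)

def evalB (best : List Char) : Int :=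
  let t := best.foldl tokStepB ([], [], 0)
  let nums := t.1 ++ [t.2.2]
  let tc := ((t.2.1).zip nums.tail).foldl zipStepB (0, nums.headD 0)  -- nums[0]; nums ≠ []
  tc.1 + tc.2

def find_longest_valid_expression_alt (s : String) : Int :=
  let best := loopB s.toList 0 []
  if best.isEmpty then 0 else evalB best

-- ===== PRECONDITION & SPEC =====
def Spec_find_longest_valid_expression (s : String) (out : Int) : Prop := out = find_longest_valid_expression_alt s
instance (s : String) (out : Int) : Decidable (Spec_find_longest_valid_expression s out) := by unfold Spec_find_longest_valid_expression; infer_instance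

-- ===== CLAIM (what is proved, stated in full; the proofs are below) =====
def Claim_equal_find_longest_valid_expression : Prop := ∀ (s : String), Dom_find_longest_valid_expression s → Spec_find_longest_valid_expression s (find_longest_valid_expression s)

-- ===== LEMMAS AND PROOFS =====


-- ---------- selection side ----------

theorem contains_validA_eq (c : Char) : validCharsA.contains c = validB.contains c := by
  have h : c ∈ validCharsA ↔ c ∈ validB := by
    simp only [validCharsA, validB, List.mem_cons, List.not_mem_nil, or_false]
    tauto
  simp only [List.contains_eq_mem]
  exact decide_eq_decide.mpr h

theorem scanEndA_eq_scanJB (s : List Char) (e : Nat) : scanEndA s e = scanJB s e := by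
  rw [scanEndA, scanJB]
  by_cases h : e < s.length
  · rw [dif_pos h, dif_pos h, contains_validA_eq]
    by_cases hv : validB.contains s[e] = true
    · rw [if_pos hv, if_pos hv]; exact scanEndA_eq_scanJB s (e + 1)
    · rw [if_neg hv, if_neg hv]
  · rw [dif_neg h, dif_neg h]
termination_by s.length - e

theorem scanJB_le_length (s : List Char) (e : Nat) (he : e ≤ s.length) : scanJB s e ≤ s.length := by
  rw [scanJB]
  by_cases h : e < s.length
  · rw [dif_pos h]
    by_cases hv : validB.contains s[e] = true
    · rw [if_pos hv]; exact scanJB_le_length s (e + 1) (by omega)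
    · rw [if_neg hv]; omega
  · rw [dif_neg h]; omega
termination_by s.length - e

theorem scanJB_valid_range (s : List Char) (e idx : Nat) (h : idx < s.length)
    (h1 : e ≤ idx) (h2 : idx < scanJB s e) : validB.contains (s[idx]'h) = true := by
  rw [scanJB] at h2
  by_cases he : e < s.length
  · rw [dif_pos he] at h2
    by_cases hv : validB.contains (s[e]'he) = true
    · rw [if_pos hv] at h2
      by_cases heq : idx = e
      · subst heq; exact hv
      · exact scanJB_valid_range s (e + 1) idx h (by omega) h2
    · rw [if_neg hv] at h2; omega
  · rw [dif_neg he] at h2; omega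
termination_by s.length - e

theorem scanJB_boundary (s : List Char) (e : Nat) (he : e ≤ s.length) :
    scanJB s e = s.length ∨ ∃ h : scanJB s e < s.length, validB.contains (s[scanJB s e]'h) = false := by
  rw [scanJB]
  by_cases h : e < s.length
  · rw [dif_pos h]
    by_cases hv : validB.contains (s[e]'h) = true
    · rw [if_pos hv]; exact scanJB_boundary s (e + 1) (by omega)
    · rw [if_neg hv]
      exact Or.inr ⟨h, by simpa using hv⟩
  · rw [dif_neg h]; left; omega
termination_by s.length - e

theorem scanJB_const (s : List Char) (j : Nat) (hj : j ≤ s.length)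
    (hbound : j = s.length ∨ ∃ h : j < s.length, validB.contains (s[j]'h) = false)
    (m : Nat) (hm : m ≤ j)
    (hvalid : ∀ idx (h : idx < s.length), m ≤ idx → idx < j → validB.contains (s[idx]'h) = true) :
    scanJB s m = j := by
  rw [scanJB]
  by_cases hlt : m < s.length
  · rw [dif_pos hlt]
    by_cases hmj : m < j
    · rw [if_pos (hvalid m hlt le_rfl hmj)]
      exact scanJB_const s j hj hbound (m + 1) (by omega)
        (fun idx h h1 h2 => hvalid idx h (by omega) h2)
    · have hq : m = j := by omega
      subst hq
      rcases hbound with hb | ⟨hb, hbv⟩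
      · omega
      · rw [if_neg (by simpa using hbv)]
  · rw [dif_neg hlt]; omega
termination_by j - m

theorem kLoopB_drop (run : List Char) (k : Nat) (hk : k ≤ run.length) :
    run.drop (kLoopB run k) = (run.drop k).dropWhile (· = '-') := by
  rw [kLoopB]
  by_cases h : k < run.length
  · rw [dif_pos h]
    have hdrop : run.drop k = run[k] :: run.drop (k + 1) := List.drop_eq_getElem_cons h
    by_cases hc : run[k] = '-'
    · rw [if_pos hc, kLoopB_drop run (k + 1) (by omega), hdrop]
      simp [hc]
    · rw [if_neg hc, hdrop, List.dropWhile_cons, if_neg (by simp [hc])]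
  · rw [dif_neg h]
    have h1 : run.drop k = [] := List.drop_eq_nil_of_le (by omega)
    simp [h1]
termination_by run.length - k

-- ---------- qualA characterization ----------

theorem replace_go_single (a b : Char) : ∀ (fuel : Nat) (l acc : List Char), l.length ≤ fuel →
    PySem.Chars.replace.go [a] [b] fuel l acc
      = acc.reverse ++ l.map (fun c => if c = a then b else c) := by
  intro fuel
  induction fuel with
  | zero =>
    intro l acc h
    have hl : l = [] := by cases l <;> simp_all
    subst hl; simp [PySem.Chars.replace.go]
  | succ n ih =>
    intro l acc h
    cases l with
    | nil => simp [PySem.Chars.replace.go]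
    | cons c t =>
      rw [PySem.Chars.replace.go]
      by_cases hc : c = a
      · rw [if_pos (by simp [List.isPrefixOf, hc])]
        show PySem.Chars.replace.go [a] [b] n t (b :: acc)
            = acc.reverse ++ (c :: t).map (fun c => if c = a then b else c)
        rw [ih t (b :: acc) (by simpa using h)]
        simp [hc]
      · rw [if_neg (by simp [List.isPrefixOf]; tauto)]
        rw [ih t (c :: acc) (by simpa using h)]
        simp [hc]

theorem count_go_single (a : Char) : ∀ (fuel : Nat) (l : List Char) (acc : Nat), l.length ≤ fuel →
    PySem.Chars.count.go [a] fuel l acc = acc + l.count a := by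
  intro fuel
  induction fuel with
  | zero =>
    intro l acc h
    have hl : l = [] := by cases l <;> simp_all
    subst hl; simp [PySem.Chars.count.go]
  | succ n ih =>
    intro l acc h
    cases l with
    | nil => simp [PySem.Chars.count.go]
    | cons c t =>
      rw [PySem.Chars.count.go]
      by_cases hc : c = a
      · rw [if_pos (by simp [List.isPrefixOf, hc])]
        show PySem.Chars.count.go [a] n t (acc + 1) = acc + (c :: t).count a
        rw [ih t (acc + 1) (by simpa using h)]
        simp [hc]
        omega
      · rw [if_neg (by simp [List.isPrefixOf]; tauto)]
        rw [ih t acc (by simpa using h)]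
        simp [List.count_cons]
        exact hc

theorem replace_single (l : List Char) (a b : Char) :
    PySem.Chars.replace l [a] [b] = l.map (fun c => if c = a then b else c) := by
  rw [PySem.Chars.replace]
  rw [if_neg (by simp)]
  simpa using replace_go_single a b l.length l [] le_rfl

theorem count_single (l : List Char) (a : Char) : PySem.Chars.count l [a] = l.count a := by
  rw [PySem.Chars.count]
  rw [if_neg (by simp)]
  simpa using count_go_single a l.length l 0 le_rfl

theorem ops_mark (c : Char) :
    ((if (if c = '-' then '+' else c) = '*' then '+' else (if c = '-' then '+' else c)) = '+')
      ↔ c ∈ opsB := by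
  by_cases h1 : c = '-' <;> by_cases h2 : c = '*' <;> by_cases h3 : c = '+' <;>
    simp [h1, h2, h3, opsB]

theorem qualA_char (t : List Char) :
    qualA t = (t.dropWhile (· = '-')).any (fun c => opsB.contains c) := by
  unfold qualA
  rw [replace_single, replace_single, count_single, List.map_map]
  have hiff : 0 < (((t.dropWhile (· = '-')).map
        ((fun c => if c = '*' then '+' else c) ∘ fun c => if c = '-' then '+' else c)).count '+')
      ↔ ((t.dropWhile (· = '-')).any (fun c => opsB.contains c) = true) := by
    rw [List.count_pos_iff, List.mem_map, List.any_eq_true]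
    refine exists_congr fun c => and_congr_right fun _ => ?_
    simp only [Function.comp]
    rw [ops_mark]
    simp
  cases hb : (t.dropWhile (· = '-')).any (fun c => opsB.contains c)
  · refine decide_eq_false fun hp => ?_
    have h2 := hiff.mp hp
    rw [hb] at h2
    exact absurd h2 (by simp)
  · exact decide_eq_true (hiff.mpr hb)

-- ---------- "minuses then digits" is closed under take/drop ----------

theorem noq_tail (c : Char) (t : List Char)
    (h : ((c :: t).dropWhile (· = '-')).any (fun x => opsB.contains x) = false) :
    (t.dropWhile (· = '-')).any (fun x => opsB.contains x) = false := by
  by_cases hc : c = '-'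
  · rwa [List.dropWhile_cons, if_pos (by simp [hc])] at h
  · rw [List.dropWhile_cons, if_neg (by simp [hc])] at h
    simp only [List.any_eq_false] at h ⊢
    intro x hx
    exact h x (List.mem_cons_of_mem c ((List.dropWhile_sublist _).subset hx))

theorem noq_drop (t : List Char) : ∀ a : Nat,
    (t.dropWhile (· = '-')).any (fun x => opsB.contains x) = false →
    ((t.drop a).dropWhile (· = '-')).any (fun x => opsB.contains x) = false := by
  induction t with
  | nil => intro a h; simp
  | cons c r ih =>
    intro a h
    cases a with
    | zero => exact h
    | succ a' =>
      rw [List.drop_succ_cons]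
      exact ih a' (noq_tail c r h)

theorem noq_take (t : List Char) : ∀ k : Nat,
    (t.dropWhile (· = '-')).any (fun x => opsB.contains x) = false →
    ((t.take k).dropWhile (· = '-')).any (fun x => opsB.contains x) = false := by
  induction t with
  | nil => intro k h; simp
  | cons c r ih =>
    intro k h
    cases k with
    | zero => simp
    | succ k' =>
      rw [List.take_succ_cons]
      by_cases hc : c = '-'
      · rw [List.dropWhile_cons, if_pos (by simp [hc])] at h ⊢
        exact ih k' h
      · rw [List.dropWhile_cons, if_neg (by simp [hc])] at h ⊢
        simp only [List.any_eq_false] at h ⊢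
        intro x hx
        rcases List.mem_cons.mp hx with rfl | hx2
        · exact h x (by simp)
        · exact h x (List.mem_cons_of_mem c (List.take_subset k' r hx2))

theorem noq_segment (t : List Char) (a m : Nat)
    (h : (t.dropWhile (· = '-')).any (fun x => opsB.contains x) = false) :
    (((t.drop a).take m).dropWhile (· = '-')).any (fun x => opsB.contains x) = false :=
  noq_take (t.drop a) m (noq_drop t a h)

-- a slice of the run, re-expressed as a slice of s
theorem slice_in_run (s : List Char) (i j a e : Nat) (hia : i ≤ a) (hae : a ≤ e) (hej : e ≤ j) :
    (s.drop a).take (e - a) = (((s.drop i).take (j - i)).drop (a - i)).take (e - a) := by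
  rw [List.drop_take, List.drop_drop]
  have h1 : i + (a - i) = a := by omega
  rw [h1, List.take_take]
  have h2 : min (e - a) (j - i - (a - i)) = e - a := by omega
  rw [h2]

-- ---------- A's inner loop never updates when no admissible slice beats maxLen ----------

theorem innerA_no (s : List Char) (start maxLen : Nat) (maxExpr : List Char) :
    ∀ e : Nat,
      (∀ e', start < e' → e' ≤ e →
        qualA (PySem.List.slice s (some (start : Int)) (some (e' : Int))) = true →
        e' - start ≤ maxLen) →
      innerA s start e maxLen maxExpr = (maxLen, maxExpr) := by
  intro e
  induction e using Nat.strong_induction_on with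
  | _ e ih =>
    intro hq
    rw [innerA]
    by_cases hgt : e > start
    · rw [if_pos hgt]
      by_cases hq1 : qualA (PySem.List.slice s (some (start : Int)) (some (e : Int))) = true
      · rw [if_pos hq1, if_neg (by have := hq e hgt le_rfl hq1; omega)]
      · rw [if_neg hq1]
        exact ih (e - 1) (by omega) (fun e' h1 h2 h3 => hq e' h1 (by omega) h3)
    · rw [if_neg hgt]

-- skipping the later start positions of a run leaves A's state unchanged
theorem outer_skip (s : List Char) (i j m : Nat) (x : List Char)
    (hjn : j ≤ s.length)
    (hvalid : ∀ idx (h : idx < s.length), i ≤ idx → idx < j → validB.contains (s[idx]'h) = true)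
    (hbound : j = s.length ∨ ∃ h : j < s.length, validB.contains (s[j]'h) = false)
    (hm : ∀ start' e, i < start' → start' < e → e ≤ j →
      qualA ((s.drop start').take (e - start')) = true → e - start' ≤ m) :
    ∀ start', i < start' → start' ≤ j → outerA s start' m x = outerA s j m x := by
  intro start' h1 h2
  by_cases heq : start' = j
  · rw [heq]
  · have hlt : start' < j := by omega
    have hsl : start' < s.length := by omega
    rw [outerA, dif_pos hsl]
    show outerA s (start' + 1) (innerA s start' (scanEndA s start') m x).1
        (innerA s start' (scanEndA s start') m x).2 = outerA s j m x
    have hscan : scanEndA s start' = j := by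
      rw [scanEndA_eq_scanJB]
      exact scanJB_const s j hjn hbound start' (by omega)
        (fun idx h ha hb => hvalid idx h (by omega) hb)
    have hinner : innerA s start' j m x = (m, x) := by
      apply innerA_no
      intro e' he'1 he'2 he'q
      rw [PySem.List.slice_natCast] at he'q
      exact hm start' e' h1 he'1 he'2 he'q
    rw [hscan, hinner]
    exact outer_skip s i j m x hjn hvalid hbound hm (start' + 1) (by omega) (by omega)
termination_by start' => j - start'

-- the run (A's and Source B's identical slice) consists of valid characters
theorem run_valid (s : List Char) (i : Nat) (hi : i ≤ s.length) :
    ∀ c ∈ PySem.List.slice s (some (i : Int)) (some ((scanJB s i : Nat) : Int)),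
      validB.contains c = true := by
  intro c hc
  rw [PySem.List.slice_natCast] at hc
  obtain ⟨idx, hidx, rfl⟩ := List.mem_iff_getElem.mp hc
  have hlt : idx < scanJB s i - i := by
    have := hidx
    simp [List.length_take, List.length_drop] at this
    omega
  have hsl : i + idx < s.length := by
    have := hidx
    simp [List.length_take, List.length_drop] at this
    omega
  have : ((s.drop i).take (scanJB s i - i))[idx] = s[i + idx]'hsl := by
    rw [List.getElem_take, List.getElem_drop]
  rw [this]
  exact scanJB_valid_range s i (i + idx) hsl (by omega) (by omega)


-- ---------- evaluation side ----------

-- token-level recursion equivalent to Source B's tokenizer fold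
def tokCore : List Char → Int → List Int × List Char × Int
  | [], num => ([], [], num)
  | c :: r, num =>
    if opsB.contains c then
      (num :: (tokCore r 0).1, c :: (tokCore r 0).2.1, (tokCore r 0).2.2)
    else tokCore r (num * 10 + pvIntOfDigitB c)

theorem tok_fold (t : List Char) : ∀ (nums : List Int) (ops : List Char) (num : Int),
    t.foldl tokStepB (nums, ops, num)
      = (nums ++ (tokCore t num).1, ops ++ (tokCore t num).2.1, (tokCore t num).2.2) := by
  induction t with
  | nil => intro nums ops num; simp [tokCore]
  | cons c r ih =>
    intro nums ops num
    by_cases h : c ∈ opsB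
    · simp [tokStepB, h, tokCore, ih]
    · simp [tokStepB, h, tokCore, ih]

theorem tok_ops (t : List Char) : ∀ (num : Int) (c : Char), c ∈ (tokCore t num).2.1 → c ∈ opsB := by
  induction t with
  | nil => intro num c hc; simp [tokCore] at hc
  | cons d r ih =>
    intro num c hc
    by_cases h : opsB.contains d = true
    · rw [tokCore, if_pos h] at hc
      rcases List.mem_cons.mp hc with rfl | hc2
      · simpa using h
      · exact ih _ _ hc2
    · rw [tokCore, if_neg h] at hc
      exact ih _ _ hc

-- all finished terms as one recursion: total + current term
def evalTerms : Int → List (Char × Int) → Int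
  | cur, [] => cur
  | cur, (op, v) :: r =>
      if op = '*' then evalTerms (cur * v) r
      else if op = '+' then cur + evalTerms v r
      else cur + evalTerms (-v) r

theorem zip_fold (ps : List (Char × Int)) : ∀ total cur : Int,
    (ps.foldl zipStepB (total, cur)).1 + (ps.foldl zipStepB (total, cur)).2
      = total + evalTerms cur ps := by
  induction ps with
  | nil => intro total cur; simp [evalTerms]
  | cons p r ih =>
    intro total cur
    obtain ⟨op, v⟩ := p
    by_cases h1 : op = '*'
    · rw [List.foldl_cons, show zipStepB (total, cur) (op, v) = (total, cur * v) from by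
        simp [zipStepB, h1], ih]
      simp [evalTerms, h1]
    · by_cases h2 : op = '+'
      · rw [List.foldl_cons, show zipStepB (total, cur) (op, v) = (total + cur, v) from by
          simp [zipStepB, h2], ih]
        simp [evalTerms, h2]; ring
      · rw [List.foldl_cons, show zipStepB (total, cur) (op, v) = (total + cur, -v) from by
          simp [zipStepB, h1, h2], ih]
        simp [evalTerms, h1, h2]; ring

-- one push of A's evaluate loop, at token level
def pushOp (stack : List Int) (sign : Char) (num : Int) : List Int :=
  if sign = '+' then stack ++ [num]
  else if sign = '-' then stack ++ [-num]
  else if sign = '*' then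
    match stack.getLast? with
    | some v => stack.dropLast ++ [v * num]
    | none => [num]
  else stack

def foldPush : List Int → List (Char × Int) → List Int
  | stack, [] => stack
  | stack, (c, v) :: r => foldPush (pushOp stack c v) r

theorem valid_char_cases (c : Char) (h : c ∈ validB) :
    (c ∈ opsB ∧ c ∈ opsSetA ∧ PySem.Chars.isdigit c = false) ∨
    (c ∉ opsB ∧ PySem.Chars.isdigit c = true) := by
  simp only [validB, List.mem_cons, List.not_mem_nil, or_false] at h
  rcases h with rfl|rfl|rfl|rfl|rfl|rfl|rfl|rfl|rfl|rfl|rfl|rfl|rfl <;> decide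

theorem evalStepA_op (st : List Int × Int × Char) (c : Char)
    (h2 : PySem.Chars.isdigit c = false) (h3 : c ∈ opsSetA) :
    evalStepA st c = (pushOp st.1 st.2.2 st.2.1, 0, c) := by
  simp [evalStepA, pushOp, h2, h3]

theorem fold_evalA (t : List Char) : ∀ (stack : List Int) (num : Int) (sign : Char),
    (∀ c ∈ t, c ∈ validB) →
    ((t ++ ['+']).foldl evalStepA (stack, num, sign)).1
      = foldPush stack ((sign :: (tokCore t num).2.1).zip ((tokCore t num).1 ++ [(tokCore t num).2.2])) := by
  induction t with
  | nil =>
    intro stack num sign _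
    show (evalStepA (stack, num, sign) '+').1 = _
    rw [evalStepA_op _ _ (by decide) (by decide)]
    simp [tokCore, foldPush]
  | cons c r ih =>
    intro stack num sign hv
    have hc := valid_char_cases c (hv c (by simp))
    rcases hc with ⟨h1, h3, h2⟩ | ⟨h1, h2⟩
    · show ((r ++ ['+']).foldl evalStepA (evalStepA (stack, num, sign) c)).1 = _
      rw [evalStepA_op _ _ h2 h3]
      rw [ih (pushOp stack sign num) 0 c (fun d hd => hv d (by simp [hd]))]
      simp [tokCore, h1, foldPush]
    · show ((r ++ ['+']).foldl evalStepA (evalStepA (stack, num, sign) c)).1 = _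
      have hst : evalStepA (stack, num, sign) c = (stack, num * 10 + pvIntOfDigit c, sign) := by
        simp [evalStepA, h2]
      rw [hst, ih stack _ sign (fun d hd => hv d (by simp [hd]))]
      simp [tokCore, h1, pvIntOfDigit, pvIntOfDigitB]

theorem sum_foldPush (ps : List (Char × Int)) : ∀ (stack : List Int) (cur : Int),
    (∀ p ∈ ps, p.1 ∈ opsB) →
    (foldPush (stack ++ [cur]) ps).sum = stack.sum + evalTerms cur ps := by
  induction ps with
  | nil => intro stack cur _; simp [foldPush, evalTerms]
  | cons p r ih =>
    intro stack cur hp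
    obtain ⟨op, v⟩ := p
    have hop : op = '+' ∨ op = '-' ∨ op = '*' := by
      have := hp (op, v) (by simp)
      simpa [opsB] using this
    rcases hop with rfl | rfl | rfl
    · show (foldPush (pushOp (stack ++ [cur]) '+' v) r).sum = _
      have hpp : pushOp (stack ++ [cur]) '+' v = (stack ++ [cur]) ++ [v] := by simp [pushOp]
      rw [hpp, ih (stack ++ [cur]) v (fun q hq => hp q (by simp [hq]))]
      simp [evalTerms]; ring
    · show (foldPush (pushOp (stack ++ [cur]) '-' v) r).sum = _
      have hpp : pushOp (stack ++ [cur]) '-' v = (stack ++ [cur]) ++ [-v] := by simp [pushOp]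
      rw [hpp, ih (stack ++ [cur]) (-v) (fun q hq => hp q (by simp [hq]))]
      simp [evalTerms]; ring
    · show (foldPush (pushOp (stack ++ [cur]) '*' v) r).sum = _
      have hpp : pushOp (stack ++ [cur]) '*' v = stack ++ [cur * v] := by
        simp [pushOp]
      rw [hpp, ih stack (cur * v) (fun q hq => hp q (by simp [hq]))]
      simp [evalTerms]

theorem eval_eq (t : List Char) (hv : ∀ c ∈ t, validB.contains c = true) :
    evalA t = evalB t := by
  have hv' : ∀ c ∈ t, c ∈ validB := fun c hc => by simpa using hv c hc
  cases ht : t with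
  | nil => rfl
  | cons c r =>
    subst ht
    unfold evalA evalB
    simp only [List.isEmpty_cons, if_false, Bool.false_eq_true]
    rw [tok_fold, fold_evalA _ _ _ _ hv']
    set tk := tokCore (c :: r) 0 with htk
    simp only [List.nil_append]
    cases hn : tk.1 ++ [tk.2.2] with
    | nil => simp at hn
    | cons h0 t' =>
      have hzip : ('+' :: tk.2.1).zip (h0 :: t') = ('+', h0) :: tk.2.1.zip t' := by
        simp [List.zip]
      rw [hzip]
      show (foldPush (pushOp [] '+' h0) (tk.2.1.zip t')).sum = _
      have hpush : pushOp [] '+' h0 = ([] : List Int) ++ [h0] := by simp [pushOp]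
      rw [hpush, sum_foldPush _ _ _ (fun q hq => tok_ops _ _ _ (List.of_mem_zip hq).1)]
      rw [← htk]
      simp only [List.headD_cons, List.tail_cons]
      rw [zip_fold (tk.2.1.zip t') 0 h0]
      simp


-- ---------- the main induction ----------

theorem main_aux (s : List Char) : ∀ (fuel i : Nat) (best : List Char), s.length - i ≤ fuel →
    outerA s i best.length best = loopB s i best := by
  intro fuel
  induction fuel with
  | zero =>
    intro i best h
    have hni : ¬ i < s.length := by omega
    rw [outerA, dif_neg hni, loopB, dif_neg hni]
  | succ n ih =>
    intro i best hfuel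
    by_cases hi : i < s.length
    · by_cases hv : validB.contains s[i] = true
      · -- at the start of a run
        have hij : i < scanJB s i := lt_scanJB s i hi hv
        have hjn : scanJB s i ≤ s.length := scanJB_le_length s i (by omega)
        have hvalid : ∀ idx (h : idx < s.length), i ≤ idx → idx < scanJB s i →
            validB.contains (s[idx]'h) = true :=
          fun idx h h1 h2 => scanJB_valid_range s i idx h h1 h2
        have hbound := scanJB_boundary s i (by omega)
        set j := scanJB s i with hj
        set run := PySem.List.slice s (some (i : Int)) (some ((j : Nat) : Int)) with hrun
        have hrun_eq : run = (s.drop i).take (j - i) := by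
          rw [hrun, PySem.List.slice_natCast]
        have hrun_len : run.length = j - i := by
          rw [hrun_eq]; simp [List.length_take, List.length_drop]; omega
        -- A side: one outer step
        rw [outerA, dif_pos hi]
        show outerA s (i + 1) (innerA s i (scanEndA s i) best.length best).1
            (innerA s i (scanEndA s i) best.length best).2 = loopB s i best
        rw [scanEndA_eq_scanJB, ← hj]
        -- B side: one run step
        rw [loopB, dif_pos hi, dif_pos hv]
        show _ = loopB s j
          (if (PySem.List.slice run (some ((kLoopB run 0 : Nat) : Int)) none).any
              (fun c => opsB.contains c) && run.length > best.length then run else best)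
        have hkdrop : PySem.List.slice run (some ((kLoopB run 0 : Nat) : Int)) none
            = run.dropWhile (· = '-') := by
          rw [PySem.List.slice_from_natCast]
          have := kLoopB_drop run 0 (by omega)
          simpa using this
        rw [hkdrop]
        have hcond := qualA_char run
        cases hq : qualA run with
        | true =>
          have hany : (run.dropWhile (· = '-')).any (fun c => opsB.contains c) = true := by
            rw [← hcond]; exact hq
          rw [hany]
          have hinner : innerA s i j best.length best
              = if j - i > best.length then (j - i, run) else (best.length, best) := by
            rw [innerA, if_pos hij, if_pos (by rw [← hrun]; exact hq), ← hrun]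
          by_cases hl : j - i > best.length
          · rw [hinner, if_pos hl,
              if_pos (show (true && decide (run.length > best.length)) = true by
                simp [hrun_len]; omega)]
            show outerA s (i + 1) (j - i) run = loopB s j run
            have hskip := outer_skip s i j (j - i) run hjn hvalid hbound
              (fun start' e ha hb hc _ => by omega) (i + 1) (by omega) (by omega)
            rw [hskip, ← hrun_len]
            exact ih j run (by omega)
          · rw [hinner, if_neg hl,
              if_neg (show ¬ (true && decide (run.length > best.length)) = true by
                simp [hrun_len]; omega)]
            show outerA s (i + 1) best.length best = loopB s j best
            have hskip := outer_skip s i j best.length best hjn hvalid hbound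
              (fun start' e ha hb hc _ => by omega) (i + 1) (by omega) (by omega)
            rw [hskip]
            exact ih j best (by omega)
        | false =>
          have hany : (run.dropWhile (· = '-')).any (fun c => opsB.contains c) = false := by
            rw [← hcond]; exact hq
          rw [hany]
          simp only [Bool.false_and, Bool.false_eq_true, if_false]
          have hinner : innerA s i j best.length best = (best.length, best) := by
            apply innerA_no
            intro e' he'1 he'2 he'q
            exfalso
            rw [PySem.List.slice_natCast] at he'q
            have hseg : (s.drop i).take (e' - i) = run.take (e' - i) := by
              rw [hrun_eq, List.take_take]
              have : min (e' - i) (j - i) = e' - i := by omega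
              rw [this]
            rw [hseg] at he'q
            have := noq_take run (e' - i) hany
            rw [qualA_char] at he'q
            rw [he'q] at this
            exact absurd this (by simp)
          rw [hinner]
          show outerA s (i + 1) best.length best = loopB s j best
          have hm : ∀ start' e, i < start' → start' < e → e ≤ j →
              qualA ((s.drop start').take (e - start')) = true → e - start' ≤ best.length := by
            intro start' e ha hb hc hqq
            exfalso
            rw [slice_in_run s i j start' e (by omega) (by omega) (by omega)] at hqq
            rw [← hrun_eq] at hqq
            have := noq_segment run (start' - i) (e - start') hany
            rw [qualA_char] at hqq
            rw [hqq] at this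
            exact absurd this (by simp)
          have hskip := outer_skip s i j best.length best hjn hvalid hbound hm
            (i + 1) (by omega) (by omega)
          rw [hskip]
          exact ih j best (by omega)
      · -- invalid character: both sides step by one
        have hscan : scanJB s i = i := by rw [scanJB, dif_pos hi, if_neg hv]
        rw [outerA, dif_pos hi]
        show outerA s (i + 1) (innerA s i (scanEndA s i) best.length best).1
            (innerA s i (scanEndA s i) best.length best).2 = loopB s i best
        rw [scanEndA_eq_scanJB, hscan, innerA, if_neg (lt_irrefl i)]
        rw [loopB, dif_pos hi, dif_neg hv]
        exact ih (i + 1) best (by omega)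
    · rw [outerA, dif_neg hi, loopB, dif_neg hi]

theorem main_eq (s : List Char) : outerA s 0 0 [] = loopB s 0 [] := by
  have := main_aux s s.length 0 [] (by omega)
  simpa using this

theorem best_valid_aux (s : List Char) : ∀ (fuel i : Nat) (best : List Char), s.length - i ≤ fuel →
    (∀ c ∈ best, validB.contains c = true) →
    ∀ c ∈ loopB s i best, validB.contains c = true := by
  intro fuel
  induction fuel with
  | zero =>
    intro i best h hb
    have hni : ¬ i < s.length := by omega
    rw [loopB, dif_neg hni]
    exact hb
  | succ n ih =>
    intro i best hfuel hb
    by_cases hi : i < s.length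
    · by_cases hv : validB.contains s[i] = true
      · rw [loopB, dif_pos hi, dif_pos hv]
        have hij : i < scanJB s i := lt_scanJB s i hi hv
        apply ih (scanJB s i) _ (by omega)
        intro c hc
        by_cases hsel : ((PySem.List.slice (PySem.List.slice s (some (i : Int)) (some ((scanJB s i : Nat) : Int))) (some ((kLoopB (PySem.List.slice s (some (i : Int)) (some ((scanJB s i : Nat) : Int))) 0 : Nat) : Int)) none).any (fun c => opsB.contains c) && (PySem.List.slice s (some (i : Int)) (some ((scanJB s i : Nat) : Int))).length > best.length) = true
        · rw [if_pos hsel] at hc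
          exact run_valid s i (by omega) c hc
        · rw [if_neg hsel] at hc
          exact hb c hc
      · rw [loopB, dif_pos hi, dif_neg hv]
        exact ih (i + 1) best (by omega) hb
    · rw [loopB, dif_neg hi]
      exact hb

theorem best_valid (s : List Char) (i : Nat) (best : List Char)
    (hb : ∀ c ∈ best, validB.contains c = true) :
    ∀ c ∈ loopB s i best, validB.contains c = true :=
  best_valid_aux s s.length i best (by omega) hb

-- ===== VERDICT (by name: the statement is the Claim_ definition above) =====
theorem find_longest_valid_expression_spec : Claim_equal_find_longest_valid_expression := by
  intro s _
  unfold Spec_find_longest_valid_expression find_longest_valid_expression find_longest_valid_expression_alt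
  rw [main_eq]
  have hv := best_valid s.toList 0 [] (by simp)
  by_cases h : (loopB s.toList 0 []).isEmpty <;> simp [h, eval_eq _ hv]
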